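-- pv_equiv track=rewrite | github.com/timothyroch/HackerRank | AI/Natural Language Processing/correct_search_query.py | post_us_heuristic
-- ===== SOURCE A (Python) =====
-- def post_us_heuristic(tokens):
--     """Map 'us' -> 'USA' in contexts like 'us university'."""
--     country_context={"university","universities","visa","embassy","college","rankings"}
--     out=[]; i=0
--     while i<len(tokens):
--         t=tokens[i]
--         if t=="us" and i+1<len(tokens) and tokens[i+1] in country_context:
--             out.append("USA"); i+=1
--         else: out.append(t)
--         i+=1
--     return out
-- ===== SOURCE B (Python) =====
-- def post_us_heuristic(tokens):
--     """Map 'us' -> 'USA' in contexts like 'us university'."""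
--     ctx = {"university", "universities", "visa", "embassy", "college", "rankings"}
--     nexts = tokens[1:] + [""]
--     flags = [t == "us" and nx in ctx for t, nx in zip(tokens, nexts)]
--     prev = [False] + flags[:-1]
--     return ["USA" if f else t for (t, f), p in zip(zip(tokens, flags), prev) if not p]
-- ===== Notes on version B (the rewrite author's own statement) =====
-- stated objective: alternative
-- what changed: Replaces A's single interleaved consume-and-skip while loop (index jumping by 1 or 2) with a mark-then-emit decomposition: one pass flags every 'us'-before-context position, a second pass emits 'USA' at flagged positions and skips the consumed successor.
import Mathlib
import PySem

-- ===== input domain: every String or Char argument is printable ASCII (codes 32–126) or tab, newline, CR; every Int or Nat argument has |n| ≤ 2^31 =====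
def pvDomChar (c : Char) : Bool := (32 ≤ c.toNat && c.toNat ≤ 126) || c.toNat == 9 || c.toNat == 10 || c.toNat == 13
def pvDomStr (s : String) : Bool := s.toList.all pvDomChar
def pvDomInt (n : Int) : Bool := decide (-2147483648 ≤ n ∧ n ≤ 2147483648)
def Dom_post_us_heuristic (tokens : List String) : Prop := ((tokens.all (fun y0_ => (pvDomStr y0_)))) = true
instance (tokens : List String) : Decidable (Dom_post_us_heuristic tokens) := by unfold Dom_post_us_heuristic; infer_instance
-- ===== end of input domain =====

-- B replaces A's single interleaved consume-and-skip loop by a mark-then-emit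
-- decomposition (flag each 'us'-before-context position, then emit skipping the
-- consumed successors); objective: alternative decomposition, same cost.

-- ===== PORT A =====
-- A's while loop advances i by 2 when it matches ('us' + context word, emit "USA")
-- and by 1 otherwise; transliterated as structural recursion with the same cases.
def ctxA : List String := ["university", "universities", "visa", "embassy", "college", "rankings"]

def post_us_heuristic : List String → List String
  | [] => []
  | [t] => [t]
  | t :: nxt :: rest' =>
    if t == "us" && ctxA.contains nxt then
      "USA" :: post_us_heuristic rest'
    else
      t :: post_us_heuristic (nxt :: rest')

-- ===== PORT B =====
def ctxB : List String := ["university", "universities", "visa", "embassy", "college", "rankings"]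

def post_us_heuristic_alt (tokens : List String) : List String :=
  let nexts := tokens.drop 1 ++ [""]
  let flags := (tokens.zip nexts).map (fun p => p.1 == "us" && ctxB.contains p.2)
  let prev := false :: flags.dropLast
  ((tokens.zip flags).zip prev).filterMap
    (fun q => if q.2 then none else some (if q.1.2 then "USA" else q.1.1))

-- ===== PRECONDITION & SPEC =====
def Spec_post_us_heuristic (tokens : List String) (out : List String) : Prop := out = post_us_heuristic_alt tokens
instance (tokens : List String) (out : List String) : Decidable (Spec_post_us_heuristic tokens out) := by unfold Spec_post_us_heuristic; infer_instance

-- ===== CLAIM (what is proved, stated in full; the proofs are below) =====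
def Claim_equal_post_us_heuristic : Prop := ∀ (tokens : List String), Dom_post_us_heuristic tokens → Spec_post_us_heuristic tokens (post_us_heuristic tokens)

-- ===== LEMMAS AND PROOFS =====

-- the per-position flag list of B
def flagsOf (tokens : List String) : List Bool :=
  (tokens.zip (tokens.drop 1 ++ [""])).map (fun p => p.1 == "us" && ctxB.contains p.2)

lemma flagsOf_cons (t : String) (rest : List String) :
    flagsOf (t :: rest) = ((t == "us" && ctxB.contains (rest.headD "")) :: flagsOf rest) := by
  cases rest with
  | nil => simp [flagsOf]
  | cons r rs => simp [flagsOf]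

-- the emit pass of B, with the flag and prev lists as parameters
def emitB (tf : List (String × Bool)) (prev : List Bool) : List String :=
  (tf.zip prev).filterMap
    (fun q => if q.2 then none else some (if q.1.2 then "USA" else q.1.1))

lemma alt_eq_emitB (tokens : List String) :
    post_us_heuristic_alt tokens
      = emitB (tokens.zip (flagsOf tokens)) (false :: (flagsOf tokens).dropLast) := by
  simp [post_us_heuristic_alt, emitB, flagsOf]

lemma ctx_not_us (s : String) (h : ctxB.contains s = true) : (s == "us") = false := by
  simp [ctxB] at h
  rcases h with h | h | h | h | h | h <;> subst h <;> decide

lemma emitB_cons (t : String) (f p : Bool) (tf : List (String × Bool)) (prev : List Bool) :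
    emitB ((t, f) :: tf) (p :: prev)
      = if p then emitB tf prev else (if f then "USA" else t) :: emitB tf prev := by
  cases p <;> simp [emitB]

lemma flagsOf_ne_nil (t : String) (rest : List String) : flagsOf (t :: rest) ≠ [] := by
  rw [flagsOf_cons]; simp

lemma emitB_main (tokens : List String) :
    emitB (tokens.zip (flagsOf tokens)) (false :: (flagsOf tokens).dropLast)
      = post_us_heuristic tokens := by
  induction tokens using post_us_heuristic.induct with
  | case1 => simp [emitB, flagsOf, post_us_heuristic]
  | case2 t =>
    have h0 : ctxB.contains "" = false := rfl
    have hf : flagsOf [t] = [false] := by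
      rw [flagsOf_cons]
      show (t == "us" && ctxB.contains "") :: flagsOf [] = [false]
      rw [h0, Bool.and_false]
      rfl
    rw [hf]
    simp [emitB, post_us_heuristic]
  | case3 t nxt rest' hc ih =>
    have hc' : (t == "us" && ctxB.contains nxt) = true := hc
    have hctx : ctxB.contains nxt = true := (Bool.and_eq_true _ _ |>.mp hc').2
    have hnxt : (nxt == "us") = false := ctx_not_us nxt hctx
    rw [flagsOf_cons, flagsOf_cons]
    simp only [List.headD_cons]
    rw [hc']
    have hf1 : (nxt == "us" && ctxB.contains (rest'.headD "")) = false := by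
      rw [hnxt, Bool.false_and]
    rw [hf1]
    cases rest' with
    | nil =>
      have hfnil : flagsOf ([] : List String) = [] := rfl
      rw [hfnil]
      conv_rhs => rw [post_us_heuristic]
      rw [if_pos hc]
      simp [emitB, post_us_heuristic]
    | cons r rs =>
      have hne : flagsOf (r :: rs) ≠ [] := flagsOf_ne_nil r rs
      rw [List.dropLast_cons_of_ne_nil (by simp), List.dropLast_cons_of_ne_nil hne]
      rw [List.zip_cons_cons, List.zip_cons_cons, emitB_cons, emitB_cons]
      rw [if_neg (by simp), if_pos rfl]
      conv_rhs => rw [post_us_heuristic]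
      rw [if_pos hc]
      rw [ih]
      simp
  | case4 t nxt rest' hc ih =>
    have hc' : (t == "us" && ctxB.contains nxt) = false := by
      exact Bool.eq_false_iff.mpr (fun h => hc h)
    rw [flagsOf_cons]
    simp only [List.headD_cons]
    rw [hc']
    have hne : flagsOf (nxt :: rest') ≠ [] := flagsOf_ne_nil nxt rest'
    rw [List.dropLast_cons_of_ne_nil hne, List.zip_cons_cons, emitB_cons]
    rw [if_neg (by simp)]
    simp only [if_neg (by simp : ¬ false = true)]
    rw [ih]
    conv_rhs => rw [post_us_heuristic]
    rw [if_neg (fun h => hc h)]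

-- ===== VERDICT (by name: the statement is the Claim_ definition above) =====
theorem post_us_heuristic_spec : Claim_equal_post_us_heuristic := by
  intro tokens _
  unfold Spec_post_us_heuristic
  rw [alt_eq_emitB, emitB_main]
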